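-- pv_equiv track=rewrite | github.com/megelclarkchangcoco/ComLab | app.py | embedded_extract_vendor_product_from_pnp_id
-- ===== SOURCE A (Python) =====
-- def embedded_extract_vendor_product_from_pnp_id(pnp_id):
--     vendor = None
--     product = None
--     serial_number = None
--
--     if not pnp_id:
--         return vendor, product, serial_number
--
--     parts = str(pnp_id).split("\\")
--
--     for part in parts:
--         upper_part = part.upper()
--
--         if "VID_" in upper_part:
--             try:
--                 vendor = upper_part.split("VID_")[1].split("&")[0]
--             except Exception:
--                 pass
--
--         if "PID_" in upper_part:
--             try:
--                 product = upper_part.split("PID_")[1].split("&")[0]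
--             except Exception:
--                 pass
--
--     if len(parts) >= 3:
--         serial_number = parts[-1]
--
--     return vendor, product, serial_number
-- ===== SOURCE B (Python) =====
-- def embedded_extract_vendor_product_from_pnp_id(pnp_id):
--     if not pnp_id:
--         return None, None, None
--
--     parts = str(pnp_id).split("\\")
--
--     def last_tagged(tag):
--         # scan back-to-front and stop at the first hit: same winner as A's
--         # forward overwrite loop, without revisiting earlier parts
--         for part in reversed(parts):
--             up = part.upper()
--             if tag in up:
--                 return up.split(tag)[1].split("&")[0]
--         return None
--
--     serial_number = parts[-1] if len(parts) >= 3 else None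
--     return last_tagged("VID_"), last_tagged("PID_"), serial_number
-- ===== Notes on version B (the rewrite author's own statement) =====
-- stated objective: alternative
-- what changed: Replaces A's single forward loop that overwrites vendor/product on every tagged part with a per-tag backward scan that returns at the first hit (same winner: the last tagged part), factored into a helper, with no try/except.
import Mathlib
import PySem

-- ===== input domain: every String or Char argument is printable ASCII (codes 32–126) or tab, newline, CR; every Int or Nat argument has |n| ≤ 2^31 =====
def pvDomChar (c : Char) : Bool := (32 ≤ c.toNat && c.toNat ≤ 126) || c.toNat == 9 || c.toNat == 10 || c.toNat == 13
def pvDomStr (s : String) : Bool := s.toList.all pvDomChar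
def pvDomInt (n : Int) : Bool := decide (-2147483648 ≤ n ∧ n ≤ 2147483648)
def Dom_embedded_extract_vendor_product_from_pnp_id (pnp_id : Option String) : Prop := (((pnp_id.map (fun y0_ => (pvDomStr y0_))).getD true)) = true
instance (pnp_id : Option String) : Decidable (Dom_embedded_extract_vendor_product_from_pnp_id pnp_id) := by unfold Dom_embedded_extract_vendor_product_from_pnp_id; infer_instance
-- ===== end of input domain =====

-- B replaces A's forward overwrite loop with a per-tag backward scan stopping at the first hit (same result; alternative decomposition).


-- ===== PORT A =====
-- A's loop body, transliterated: overwrite vendor/product on every part containing the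
-- tag; the try/except around the chained splits is the `match … | none => old` fallback.
def pvLoopBodyA (vp : Option String × Option String) (part : String) : Option String × Option String :=
  let up := PySem.Str.upper part
  let v :=
    if PySem.Str.isIn "VID_" up then
      match PySem.List.pyGet? ((PySem.Str.split? up "VID_").getD []) 1 with
      | some t =>
        match PySem.List.pyGet? ((PySem.Str.split? t "&").getD []) 0 with
        | some r => some r
        | none => vp.1             -- except: pass
      | none => vp.1               -- except: pass
    else vp.1
  let p :=
    if PySem.Str.isIn "PID_" up then
      match PySem.List.pyGet? ((PySem.Str.split? up "PID_").getD []) 1 with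
      | some t =>
        match PySem.List.pyGet? ((PySem.Str.split? t "&").getD []) 0 with
        | some r => some r
        | none => vp.2             -- except: pass
      | none => vp.2               -- except: pass
    else vp.2
  (v, p)

def embedded_extract_vendor_product_from_pnp_id (pnp_id : Option String) : Option String × Option String × Option String :=
  match pnp_id with
  | none => (none, none, none)           -- `if not pnp_id`
  | some s =>
    if s = "" then (none, none, none)    -- `if not pnp_id` (empty string is falsy)
    else
      let parts := (PySem.Str.split? s "\\").getD []   -- sep ≠ "" so always `some`
      let vp := parts.foldl pvLoopBodyA (none, none)
      let serial := if 3 ≤ parts.length then PySem.List.pyGet? parts (-1) else none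
      (vp.1, vp.2, serial)

-- ===== PORT B =====
-- B's helper `last_tagged`: scan the reversed parts, return at the first part containing the tag.
-- The `.getD ""` / `.headD ""` defaults are unreachable: the `isIn` guard makes both lists long enough.
def pvLastTagged (tag : String) : List String → Option String
  | [] => none
  | part :: rest =>
    let up := PySem.Str.upper part
    if PySem.Str.isIn tag up then
      some (((PySem.Str.split? ((PySem.List.pyGet? ((PySem.Str.split? up tag).getD []) 1).getD "") "&").getD []).headD "")
    else pvLastTagged tag rest

def embedded_extract_vendor_product_from_pnp_id_alt (pnp_id : Option String) : Option String × Option String × Option String :=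
  match pnp_id with
  | none => (none, none, none)
  | some s =>
    if s = "" then (none, none, none)
    else
      let parts := (PySem.Str.split? s "\\").getD []
      let serial := if 3 ≤ parts.length then PySem.List.pyGet? parts (-1) else none
      (pvLastTagged "VID_" parts.reverse, pvLastTagged "PID_" parts.reverse, serial)

-- ===== PRECONDITION & SPEC =====
def Spec_embedded_extract_vendor_product_from_pnp_id (pnp_id : Option String) (out : Option String × Option String × Option String) : Prop := out = embedded_extract_vendor_product_from_pnp_id_alt pnp_id
instance (pnp_id : Option String) (out : Option String × Option String × Option String) : Decidable (Spec_embedded_extract_vendor_product_from_pnp_id pnp_id out) := by unfold Spec_embedded_extract_vendor_product_from_pnp_id; infer_instance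

-- ===== CLAIM (what is proved, stated in full; the proofs are below) =====
def Claim_equal_embedded_extract_vendor_product_from_pnp_id : Prop := ∀ (pnp_id : Option String), Dom_embedded_extract_vendor_product_from_pnp_id pnp_id → Spec_embedded_extract_vendor_product_from_pnp_id pnp_id (embedded_extract_vendor_product_from_pnp_id pnp_id)

-- ===== LEMMAS AND PROOFS =====

-- proof-only abbreviations: "part contains tag" and the extracted value
def pvHit (tag part : String) : Bool := PySem.Str.isIn tag (PySem.Str.upper part)
def pvEx (tag part : String) : String :=
  ((PySem.Str.split? ((PySem.List.pyGet? ((PySem.Str.split? (PySem.Str.upper part) tag).getD []) 1).getD "") "&").getD []).headD ""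

-- splitOn.go always returns acc plus at least one more piece
theorem pv_go_len_acc (sep : List Char) : ∀ (fuel : Nat) (l cur : List Char) (acc : List (List Char)),
    acc.length + 1 ≤ (PySem.Chars.splitOn.go sep fuel l cur acc).length := by
  intro fuel
  induction fuel with
  | zero => intro l cur acc; simp [PySem.Chars.splitOn.go]
  | succ n ih =>
    intro l cur acc
    cases l with
    | nil => simp [PySem.Chars.splitOn.go]
    | cons c rest =>
      rw [PySem.Chars.splitOn.go]
      split
      · exact le_trans (by simp) (ih _ _ _)
      · exact ih _ _ _

-- with enough fuel and sep occurring in l, at least two pieces beyond acc are produced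
theorem pv_go_len_two (sep : List Char) (hsep : sep ≠ []) : ∀ (fuel : Nat) (l cur : List Char) (acc : List (List Char)),
    l.length ≤ fuel → sep <:+: l → acc.length + 2 ≤ (PySem.Chars.splitOn.go sep fuel l cur acc).length := by
  intro fuel
  induction fuel with
  | zero =>
    intro l cur acc hf hi
    obtain rfl : l = [] := List.eq_nil_of_length_eq_zero (Nat.le_zero.mp hf)
    simp at hi; exact absurd hi hsep
  | succ n ih =>
    intro l cur acc hf hi
    cases l with
    | nil => simp at hi; exact absurd hi hsep
    | cons c rest =>
      rw [PySem.Chars.splitOn.go]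
      split
      · exact le_trans (by simp) (pv_go_len_acc sep n _ _ _)
      · rename_i hnp
        have : sep <:+: rest := by
          rcases (List.infix_cons_iff).1 hi with h | h
          · exact absurd (List.isPrefixOf_iff_prefix.2 h) (by simpa using hnp)
          · exact h
        exact ih rest (c :: cur) acc (by simpa using Nat.succ_le_succ_iff.mp (by simpa using hf)) this

theorem pv_splitOn_ne_nil (cs sep : List Char) : PySem.Chars.splitOn cs sep ≠ [] := by
  have := pv_go_len_acc sep (cs.length + 1) cs [] []
  intro h
  rw [PySem.Chars.splitOn] at h
  rw [h] at this
  simp at this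

theorem pv_splitOn_len_two (cs sep : List Char) (hsep : sep ≠ []) (h : sep <:+: cs) :
    2 ≤ (PySem.Chars.splitOn cs sep).length := by
  simpa using pv_go_len_two sep hsep (cs.length + 1) cs [] [] (by omega) h

-- pyGet? at index 1 on a list of length ≥ 2 (bound supplied, so nothing is decided by unfolding)
theorem pv_pyGet_one {α : Type} (xs : List α) (h1 : 1 < xs.length) :
    PySem.List.pyGet? xs 1 = some (xs[1]'h1) := by
  unfold PySem.List.pyGet? PySem.List.pyIdx?
  rw [if_pos (by norm_num), if_pos (by exact_mod_cast h1)]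
  simp [List.getElem?_eq_getElem h1]

-- the inner `.split("&")[0]` always succeeds: splitOn is never empty
theorem pv_amp (t : String) (v : Option String) :
    (match PySem.List.pyGet? ((PySem.Str.split? t "&").getD []) 0 with
      | some r => some r
      | none => v) = some (((PySem.Str.split? t "&").getD []).headD "") := by
  have hsplit2 : PySem.Str.split? t "&"
      = some ((PySem.Chars.splitOn t.toList ("&" : String).toList).map String.ofList) := by
    simp [PySem.Str.split?, PySem.Chars.split?]
  have hne : (PySem.Chars.splitOn t.toList ("&" : String).toList).map String.ofList ≠ [] := by
    simpa using pv_splitOn_ne_nil t.toList ("&" : String).toList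
  obtain ⟨x, xs, hx⟩ := List.exists_cons_of_ne_nil hne
  rw [hsplit2, Option.getD_some, hx]
  simp [PySem.List.pyGet?, PySem.List.pyIdx?]

-- A's per-part update for one tag (with its try/except fallback) = "hit ⇒ extracted value, else keep"
theorem pv_stepA (tag part : String) (htag : tag ≠ "") (v : Option String) :
    (if PySem.Str.isIn tag (PySem.Str.upper part) then
      match PySem.List.pyGet? ((PySem.Str.split? (PySem.Str.upper part) tag).getD []) 1 with
      | some t =>
        match PySem.List.pyGet? ((PySem.Str.split? t "&").getD []) 0 with
        | some r => some r
        | none => v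
      | none => v
    else v) = if pvHit tag part then some (pvEx tag part) else v := by
  unfold pvHit pvEx
  by_cases h : PySem.Str.isIn tag (PySem.Str.upper part) = true
  · simp only [h, if_true]
    have htag' : tag.toList ≠ [] := fun hc => htag (by simpa using hc)
    have hinf : tag.toList <:+: (PySem.Str.upper part).toList := (PySem.Str.isIn_iff_infix _ _).1 h
    have hsplit : PySem.Str.split? (PySem.Str.upper part) tag
        = some ((PySem.Chars.splitOn (PySem.Str.upper part).toList tag.toList).map String.ofList) := by
      simp [PySem.Str.split?, PySem.Chars.split?, htag']
    have h1 : 1 < ((PySem.Chars.splitOn (PySem.Str.upper part).toList tag.toList).map String.ofList).length := by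
      rw [List.length_map]
      exact pv_splitOn_len_two (PySem.Str.upper part).toList tag.toList htag' hinf
    rw [hsplit, Option.getD_some, pv_pyGet_one _ h1, pv_amp, Option.getD_some]
  · simp only [Bool.not_eq_true] at h
    simp only [h, Bool.false_eq_true, if_false]

-- A's loop body in terms of pvHit/pvEx
theorem pv_loopBodyA_eq (vp : Option String × Option String) (part : String) :
    pvLoopBodyA vp part
      = ((if pvHit "VID_" part then some (pvEx "VID_" part) else vp.1),
         (if pvHit "PID_" part then some (pvEx "PID_" part) else vp.2)) := by
  unfold pvLoopBodyA
  dsimp only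
  rw [pv_stepA "VID_" part (by decide) vp.1, pv_stepA "PID_" part (by decide) vp.2]

-- B's hit branch in terms of pvHit/pvEx
theorem pv_lastTagged_cons (tag part : String) (rest : List String) :
    pvLastTagged tag (part :: rest)
      = if pvHit tag part then some (pvEx tag part) else pvLastTagged tag rest := by
  rfl

-- B's backward scan on l ++ [p]: p is only consulted when nothing later hits
theorem pv_lastTagged_append (tag p : String) (l : List String) :
    pvLastTagged tag (l ++ [p])
      = (pvLastTagged tag l).or (if pvHit tag p then some (pvEx tag p) else none) := by
  induction l with
  | nil =>
    rw [List.nil_append, pv_lastTagged_cons]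
    by_cases h : pvHit tag p <;> simp [pvLastTagged, h, Option.or]
  | cons q rest ih =>
    rw [List.cons_append, pv_lastTagged_cons, pv_lastTagged_cons, ih]
    by_cases h : pvHit tag q <;> simp [h, Option.or]

-- A's forward overwrite fold equals B's backward first-hit scan (with fallback v0)
theorem pv_fold_single (tag : String) : ∀ (parts : List String) (v0 : Option String),
    parts.foldl (fun v part => if pvHit tag part then some (pvEx tag part) else v) v0
      = (pvLastTagged tag parts.reverse).or v0 := by
  intro parts
  induction parts with
  | nil => intro v0; simp [pvLastTagged]
  | cons p rest ih =>
    intro v0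
    simp only [List.foldl_cons, List.reverse_cons, ih, pv_lastTagged_append, Option.or_assoc]
    congr 1
    by_cases h : pvHit tag p <;> simp [h, Option.or]

theorem embedded_extract_vendor_product_from_pnp_id_spec : Claim_equal_embedded_extract_vendor_product_from_pnp_id := by
  intro pnp_id _
  unfold Spec_embedded_extract_vendor_product_from_pnp_id
  cases pnp_id with
  | none => rfl
  | some s =>
    by_cases hs : s = ""
    · simp [embedded_extract_vendor_product_from_pnp_id, embedded_extract_vendor_product_from_pnp_id_alt, hs]
    · unfold embedded_extract_vendor_product_from_pnp_id embedded_extract_vendor_product_from_pnp_id_alt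
      dsimp only
      rw [if_neg hs, if_neg hs]
      have hbody : pvLoopBodyA = (fun (vp : Option String × Option String) (part : String) =>
          ((if pvHit "VID_" part then some (pvEx "VID_" part) else vp.1),
           (if pvHit "PID_" part then some (pvEx "PID_" part) else vp.2))) := by
        funext vp part; exact pv_loopBodyA_eq vp part
      rw [hbody, PySem.List.foldl_prod_mk
            (fun v part => if pvHit "VID_" part then some (pvEx "VID_" part) else v)
            (fun v part => if pvHit "PID_" part then some (pvEx "PID_" part) else v),
          pv_fold_single, pv_fold_single]
      simp
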